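-- pv_equiv track=rewrite | github.com/Sossio699/Deep-Learning-Project | Datasets.py | cfq_merge_cartesians
-- ===== SOURCE A (Python) =====
-- def cfq_merge_cartesians(triplets):
--     if not triplets:
--         return triplets
--     triplet = triplets[0]
--     if triplet[0] == "(":
--         tokens = triplet.split(" ) ( ")
--         if len(tokens) == 3:
--             to_keep = []
--             relations = [tokens[1]]
--             for triplet2 in triplets[1:]:
--                 if triplet2[0] == "(":
--                     tokens2 = triplet2.split(" ) ( ")
--                     if (len(tokens2) == 3 and tokens[0] == tokens2[0] and tokens[2] == tokens2[2]):
--                         relations.append(tokens2[1])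
--                     else:
--                         to_keep.append(triplet2)
--                 else:
--                     to_keep.append(triplet2)
--             new_triplet = (tokens[0] + " ) ( " + " ".join(relations) + " ) ( " + tokens[2])
--             return [new_triplet] + cfq_merge_cartesians(to_keep)
--         else:
--             return [triplet] + cfq_merge_cartesians(triplets[1:])
--     else:
--         return [triplet] + cfq_merge_cartesians(triplets[1:])
-- ===== SOURCE B (Python) =====
-- def cfq_merge_cartesians(triplets):
--     if not triplets:
--         return triplets
--     result = []
--     work = list(triplets)
--     while work:
--         head, rest = work[0], work[1:]
--         tokens = head.split(" ) ( ")
--         if head[0] == "(" and len(tokens) == 3: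
--             subj, rel, obj = tokens
--
--             def matches(t):
--                 if t[0] != "(":
--                     return False
--                 tk = t.split(" ) ( ")
--                 return len(tk) == 3 and tk[0] == subj and tk[2] == obj
--
--             relations = [rel] + [t.split(" ) ( ")[1] for t in rest if matches(t)]
--             result.append(subj + " ) ( " + " ".join(relations) + " ) ( " + obj)
--             work = [t for t in rest if not matches(t)]
--         else:
--             result.append(head)
--             work = rest
--     return result
-- ===== Notes on version B (the rewrite author's own statement) =====
-- stated objective: alternative
-- what changed: Replaced A's recursion that prepends each merged triplet onto the list returned by a recursive call with an iterative worklist loop carrying a result accumulator, and replaced A's single inner for-loop accumulating (to_keep, relations) element-by-element with a filter/map decomposition of the remaining entries.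
-- outside the precondition, e.g. on cfq_merge_cartesians(['']): A raises IndexError, B raises IndexError
import Mathlib
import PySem

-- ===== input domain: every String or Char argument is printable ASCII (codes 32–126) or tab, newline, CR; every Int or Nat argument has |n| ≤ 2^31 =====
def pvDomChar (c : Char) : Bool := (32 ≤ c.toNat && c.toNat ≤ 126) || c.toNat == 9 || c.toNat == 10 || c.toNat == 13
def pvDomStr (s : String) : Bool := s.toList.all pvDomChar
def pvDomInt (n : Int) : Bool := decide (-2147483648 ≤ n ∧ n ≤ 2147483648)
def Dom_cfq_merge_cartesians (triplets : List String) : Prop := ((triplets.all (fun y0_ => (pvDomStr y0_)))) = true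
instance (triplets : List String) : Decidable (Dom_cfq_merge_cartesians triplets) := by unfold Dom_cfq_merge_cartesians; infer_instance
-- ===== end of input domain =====

-- B replaces A's recursion-with-prepend and single accumulating inner for-loop by an
-- iterative worklist loop with a result accumulator whose inner scan is a
-- filter/map decomposition (objective: alternative; a timing run measured B faster).

-- Python's s.split(" ) ( "): the separator is a nonempty literal, so split? is always some
def pvSplit (s : String) : List String := (PySem.Str.split? s " ) ( ").getD []

-- ===== PORT A =====
-- A's inner for-loop over triplets[1:], carrying its (to_keep, relations) state
def aScan (s o : String) (acc : List String × List String) :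
    List String → List String × List String
  | [] => acc
  | triplet2 :: rest =>
    if triplet2.toList.head? == some '(' then
      let tokens2 := pvSplit triplet2
      if tokens2.length == 3 && s == tokens2[0]! && o == tokens2[2]! then
        aScan s o (acc.1, acc.2 ++ [tokens2[1]!]) rest
      else aScan s o (acc.1 ++ [triplet2], acc.2) rest
    else aScan s o (acc.1 ++ [triplet2], acc.2) rest

-- the length bound for A's recursion on to_keep (cited in decreasing_by)
theorem aScan_fst_len (s o : String) (rest : List String) (k r : List String) :
    ((aScan s o (k, r) rest).1).length ≤ k.length + rest.length := by
  induction rest generalizing k r with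
  | nil => simp [aScan]
  | cons t rest ih =>
      rw [aScan]
      by_cases h1 : t.toList.head? = some '('
      · simp only [h1, beq_self_eq_true, if_true]
        by_cases h2 : ((pvSplit t).length == 3 && s == (pvSplit t)[0]! && o == (pvSplit t)[2]!) = true
        · rw [if_pos h2]
          exact le_trans (ih _ _) (by simp only [List.length_cons]; omega)
        · rw [if_neg h2]
          exact le_trans (ih _ _) (by simp only [List.length_append, List.length_cons, List.length_nil]; omega)
      · have h1' : (t.toList.head? == some '(') = false := by simp [h1]
        simp only [h1', Bool.false_eq_true, if_false]
        exact le_trans (ih _ _) (by simp only [List.length_append, List.length_cons, List.length_nil]; omega)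

def cfq_merge_cartesians (triplets : List String) : List String :=
  match triplets with
  | [] => triplets
  | triplet :: rest =>
    if triplet.toList.head? == some '(' then
      let tokens := pvSplit triplet
      if tokens.length == 3 then
        let step := aScan tokens[0]! tokens[2]! (([] : List String), [tokens[1]!]) rest
        let new_triplet := tokens[0]! ++ " ) ( " ++ PySem.Str.join " " step.2 ++ " ) ( " ++ tokens[2]!
        [new_triplet] ++ cfq_merge_cartesians step.1
      else [triplet] ++ cfq_merge_cartesians rest
    else [triplet] ++ cfq_merge_cartesians rest
termination_by triplets.length
decreasing_by
  · simp only [List.length_cons]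
    exact Nat.lt_succ_of_le (by simpa using aScan_fst_len (pvSplit triplet)[0]! (pvSplit triplet)[2]! rest [] [(pvSplit triplet)[1]!])
  · simp
  · simp

-- ===== PORT B =====
-- B's matches(t) predicate
def pvMatches (subj obj : String) (t : String) : Bool :=
  if t.toList.head? != some '(' then false
  else
    let tk := pvSplit t
    tk.length == 3 && tk[0]! == subj && tk[2]! == obj

-- B's while loop: result accumulator, worklist
def pvLoop (result work : List String) : List String :=
  match work with
  | [] => result
  | head :: rest =>
    let tokens := pvSplit head
    if head.toList.head? == some '(' && tokens.length == 3 then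
      let subj := tokens[0]!
      let rel := tokens[1]!
      let obj := tokens[2]!
      let relations := [rel] ++ (rest.filter (fun t => pvMatches subj obj t)).map
        (fun t => (pvSplit t)[1]!)
      pvLoop (result ++ [subj ++ " ) ( " ++ PySem.Str.join " " relations ++ " ) ( " ++ obj])
        (rest.filter (fun t => !pvMatches subj obj t))
    else pvLoop (result ++ [head]) rest
termination_by work.length
decreasing_by
  · simp only [List.length_cons, List.length_unattach]
    exact Nat.lt_succ_of_le (le_trans (List.length_filter_le _ _) (by simp))
  · simp

def cfq_merge_cartesians_alt (triplets : List String) : List String :=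
  if triplets.isEmpty then triplets
  else pvLoop [] triplets

-- ===== PRECONDITION & SPEC =====
-- Pre_ excludes lists containing an empty string: Python A raises IndexError on
-- the subscript triplet[0] there.
def Pre_cfq_merge_cartesians (triplets : List String) : Prop :=
  ∀ s ∈ triplets, s ≠ ""
instance (triplets : List String) : Decidable (Pre_cfq_merge_cartesians triplets) := by
  unfold Pre_cfq_merge_cartesians; infer_instance

def pvWitness_cfq_merge_cartesians : List String :=
  ["( M0 ) ( likes ) ( M1 )", "plain", "( M0 ) ( hates ) ( M1 )"]

def Spec_cfq_merge_cartesians (triplets : List String) (out : List String) : Prop := out = cfq_merge_cartesians_alt triplets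
instance (triplets : List String) (out : List String) : Decidable (Spec_cfq_merge_cartesians triplets out) := by unfold Spec_cfq_merge_cartesians; infer_instance

-- ===== CLAIM (what is proved, stated in full; the proofs are below) =====
def Claim_equal_cfq_merge_cartesians : Prop := ∀ (triplets : List String), Dom_cfq_merge_cartesians triplets → Pre_cfq_merge_cartesians triplets → Spec_cfq_merge_cartesians triplets (cfq_merge_cartesians triplets)

-- ===== LEMMAS AND PROOFS =====

-- A's inner loop computes exactly B's filter/map decomposition
theorem aScan_eq (s o : String) (rest : List String) (k r : List String) :
    aScan s o (k, r) rest
      = (k ++ rest.filter (fun t => !pvMatches s o t),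
         r ++ (rest.filter (fun t => pvMatches s o t)).map (fun t => (pvSplit t)[1]!)) := by
  induction rest generalizing k r with
  | nil => simp [aScan]
  | cons t rest ih =>
      rw [aScan]
      simp only [List.filter_cons]
      by_cases hh : t.toList.head? = some '('
      · by_cases hc : (pvSplit t).length = 3 ∧ (pvSplit t)[0]! = s ∧ (pvSplit t)[2]! = o
        · have hm : pvMatches s o t = true := by
            unfold pvMatches
            rw [hh]
            simp only [bne_self_eq_false, Bool.false_eq_true, if_false]
            rw [hc.2.1, hc.2.2]
            simp [hc.1]
          simp only [hh, beq_self_eq_true, if_true]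
          rw [if_pos (by rw [hc.2.1, hc.2.2]; simp [hc.1])]
          rw [ih]
          simp [hm]
        · have hc' : (pvSplit t).length = 3 → (pvSplit t)[0]! = s → ¬(pvSplit t)[2]! = o :=
            fun a b c => hc ⟨a, b, c⟩
          have hm : pvMatches s o t = false := by
            unfold pvMatches
            rw [hh]
            simp only [bne_self_eq_false, Bool.false_eq_true, if_false,
              Bool.and_eq_false_iff, beq_eq_false_iff_ne, ne_eq]
            by_cases h1 : (pvSplit t).length = 3
            · by_cases h2 : (pvSplit t)[0]! = s
              · exact Or.inr (hc' h1 h2)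
              · exact Or.inl (Or.inr h2)
            · exact Or.inl (Or.inl h1)
          have hcond : ((pvSplit t).length == 3 && s == (pvSplit t)[0]! &&
              o == (pvSplit t)[2]!) = false := by
            simp only [Bool.and_eq_false_iff, beq_eq_false_iff_ne, ne_eq]
            by_cases h1 : (pvSplit t).length = 3
            · by_cases h2 : (pvSplit t)[0]! = s
              · exact Or.inr (fun h => hc' h1 h2 h.symm)
              · exact Or.inl (Or.inr (fun h => h2 h.symm))
            · exact Or.inl (Or.inl h1)
          simp only [hh, beq_self_eq_true, if_true, hcond, Bool.false_eq_true, if_false]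
          rw [ih]
          simp [hm]
      · have hm : pvMatches s o t = false := by simp [pvMatches, hh]
        have hh' : (t.toList.head? == some '(') = false := by simp [hh]
        simp only [hh', Bool.false_eq_true, if_false]
        rw [ih]
        simp [hm]

-- the worklist loop against A's recursion
theorem pvLoop_eq (work : List String) (result : List String) :
    pvLoop result work = result ++ cfq_merge_cartesians work := by
  induction hn : work.length using Nat.strong_induction_on generalizing work result with
  | _ n ih =>
    match work with
    | [] => rw [pvLoop, cfq_merge_cartesians]; simp
    | head :: rest =>
      by_cases hh : head.toList.head? = some '('
      · by_cases hl : (pvSplit head).length = 3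
        · rw [pvLoop, cfq_merge_cartesians]
          simp only [hh, hl, beq_self_eq_true, Bool.true_and, if_true]
          rw [aScan_eq]
          have hfl : (rest.filter (fun t =>
              !pvMatches (pvSplit head)[0]! (pvSplit head)[2]! t)).length < n := by
            have := List.length_filter_le (fun t =>
              !pvMatches (pvSplit head)[0]! (pvSplit head)[2]! t) rest
            simp only [List.length_cons] at hn; omega
          rw [ih _ hfl _ _ rfl]
          simp
        · rw [pvLoop, cfq_merge_cartesians]
          simp only [hh, hl, beq_self_eq_true, Bool.true_and, beq_iff_eq, if_false]
          have : rest.length < n := by simp only [List.length_cons] at hn; omega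
          rw [ih _ this _ _ rfl]
          simp
      · rw [pvLoop, cfq_merge_cartesians]
        have hh' : (head.toList.head? == some '(') = false := by simp [hh]
        simp only [hh', Bool.false_and, Bool.false_eq_true, if_false]
        have : rest.length < n := by simp only [List.length_cons] at hn; omega
        rw [ih _ this _ _ rfl]
        simp

-- ===== VERDICT (by name: the statement is the Claim_ definition above) =====
theorem cfq_merge_cartesians_spec : Claim_equal_cfq_merge_cartesians := by
  intro triplets _ _
  unfold Spec_cfq_merge_cartesians cfq_merge_cartesians_alt
  match triplets with
  | [] => rw [cfq_merge_cartesians]; simp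
  | t :: ts =>
      simp only [List.isEmpty_cons, Bool.false_eq_true, if_false]
      rw [pvLoop_eq]
      simp
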